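-- pv_equiv track=rewrite | github.com/Mvk122/Leetcode-Solutions | thg.py | countSignals
-- ===== SOURCE A (Python) =====
-- def countSignals(frequencies, filterRanges):
--     count = 0
--     for frequency in frequencies:
--         for r in filterRanges:
--             if frequency < r[0] or frequency > r[1]:
--                 break
--         else:
--             count += 1
--     return count
-- ===== SOURCE B (Python) =====
-- def countSignals(frequencies, filterRanges):
--     if not frequencies:
--         return 0
--     lo = hi = None
--     for r in filterRanges:
--         if lo is None or r[0] > lo:
--             lo = r[0]
--         if hi is None or r[1] < hi:
--             hi = r[1]
--     count = 0
--     for f in frequencies: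
--         if (lo is None or lo <= f) and (hi is None or f <= hi):
--             count += 1
--     return count
-- ===== Notes on version B (the rewrite author's own statement) =====
-- stated objective: faster
-- what changed: B first intersects all filter ranges into a single [lo,hi] interval in one pass over filterRanges, then counts frequencies inside it in one pass, instead of A's scan of every range for every frequency.
-- outside the precondition, e.g. on countSignals([0], [[5]]): A returns 0, B raises IndexError
import Mathlib
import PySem

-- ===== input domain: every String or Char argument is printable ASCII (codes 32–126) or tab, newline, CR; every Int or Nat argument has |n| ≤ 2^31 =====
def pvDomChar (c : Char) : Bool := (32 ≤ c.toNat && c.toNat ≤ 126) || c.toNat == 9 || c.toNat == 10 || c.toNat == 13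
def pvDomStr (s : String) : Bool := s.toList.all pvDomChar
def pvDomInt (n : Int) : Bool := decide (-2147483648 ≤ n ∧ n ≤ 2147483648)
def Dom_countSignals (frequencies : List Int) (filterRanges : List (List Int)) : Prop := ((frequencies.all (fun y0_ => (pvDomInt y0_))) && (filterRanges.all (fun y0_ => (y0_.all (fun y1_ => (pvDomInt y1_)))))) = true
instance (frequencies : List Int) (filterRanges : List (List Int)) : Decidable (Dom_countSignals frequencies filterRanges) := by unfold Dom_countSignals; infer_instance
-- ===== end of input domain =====

-- B replaces A's per-frequency scan of all ranges by one pass intersecting the ranges into [lo,hi], then one counting pass.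

-- ===== PORT A =====
-- A's inner for/else loop: true iff no range triggers the break (r[0]/r[1] via pyGetD; exact under Pre_)
def pvInnerOk (f : Int) : List (List Int) → Bool
  | [] => true
  | r :: rest =>
      if f < PySem.List.pyGetD r 0 0 || f > PySem.List.pyGetD r 1 0 then false
      else pvInnerOk f rest

def countSignals (frequencies : List Int) (filterRanges : List (List Int)) : Int :=
  frequencies.foldl (fun count f => if pvInnerOk f filterRanges then count + 1 else count) 0

-- ===== PORT B =====
-- B's first pass: fold filterRanges into (lo, hi) (None ↝ Option.none)
def pvStep (p : Option Int × Option Int) (r : List Int) : Option Int × Option Int :=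
  (match p.1 with
    | none => some (PySem.List.pyGetD r 0 0)
    | some l => if PySem.List.pyGetD r 0 0 > l then some (PySem.List.pyGetD r 0 0) else some l,
   match p.2 with
    | none => some (PySem.List.pyGetD r 1 0)
    | some h => if PySem.List.pyGetD r 1 0 < h then some (PySem.List.pyGetD r 1 0) else some h)

def pvLoHi (filterRanges : List (List Int)) : Option Int × Option Int :=
  filterRanges.foldl pvStep (none, none)

def pvInBand (p : Option Int × Option Int) (f : Int) : Bool :=
  (match p.1 with | none => true | some l => decide (l ≤ f)) &&
  (match p.2 with | none => true | some h => decide (f ≤ h))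

def countSignals_alt (frequencies : List Int) (filterRanges : List (List Int)) : Int :=
  if frequencies = [] then 0
  else
    let p := pvLoHi filterRanges
    frequencies.foldl (fun count f => if pvInBand p f then count + 1 else count) 0

-- ===== PRECONDITION & SPEC =====
-- Pre_ excludes nonempty frequency lists paired with a filter range of fewer than 2 elements: there A
-- raises IndexError on r[0]/r[1] except when the first short range already breaks by short-circuit
-- (an accident of evaluation order), and B raises IndexError there.
def Pre_countSignals (frequencies : List Int) (filterRanges : List (List Int)) : Prop :=
  frequencies = [] ∨ ∀ r ∈ filterRanges, 2 ≤ r.length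
instance (frequencies : List Int) (filterRanges : List (List Int)) : Decidable (Pre_countSignals frequencies filterRanges) := by unfold Pre_countSignals; infer_instance

def pvWitness_countSignals : List Int × List (List Int) := ([1, 5, 7], [[0, 6], [2, 9]])

def Spec_countSignals (frequencies : List Int) (filterRanges : List (List Int)) (out : Int) : Prop := out = countSignals_alt frequencies filterRanges
instance (frequencies : List Int) (filterRanges : List (List Int)) (out : Int) : Decidable (Spec_countSignals frequencies filterRanges out) := by unfold Spec_countSignals; infer_instance

-- ===== CLAIM (what is proved, stated in full; the proofs are below) =====
def Claim_equal_countSignals : Prop := ∀ (frequencies : List Int) (filterRanges : List (List Int)), Dom_countSignals frequencies filterRanges → Pre_countSignals frequencies filterRanges → Spec_countSignals frequencies filterRanges (countSignals frequencies filterRanges)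

-- ===== LEMMAS AND PROOFS =====

-- A's inner for/else succeeds iff f lies in every range
theorem pvInnerOk_iff (f : Int) (rs : List (List Int)) :
    pvInnerOk f rs = true ↔ ∀ r ∈ rs, PySem.List.pyGetD r 0 0 ≤ f ∧ f ≤ PySem.List.pyGetD r 1 0 := by
  induction rs with
  | nil => simp [pvInnerOk]
  | cons r rest ih =>
    simp only [pvInnerOk, List.forall_mem_cons]
    split_ifs with h
    · simp only [Bool.or_eq_true, decide_eq_true_eq] at h
      constructor
      · intro hc; cases hc
      · rintro ⟨⟨h1, h2⟩, -⟩; omega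
    · simp only [Bool.or_eq_true, decide_eq_true_eq, not_or, not_lt] at h
      rw [ih]
      exact ⟨fun hr => ⟨⟨h.1, h.2⟩, hr⟩, fun hr => hr.2⟩

-- one step of B's first pass, seen through the band test
theorem pvInBand_pvStep (p : Option Int × Option Int) (r : List Int) (f : Int) :
    pvInBand (pvStep p r) f
      = (pvInBand p f && decide (PySem.List.pyGetD r 0 0 ≤ f ∧ f ≤ PySem.List.pyGetD r 1 0)) := by
  obtain ⟨a, b⟩ := p
  cases a <;> cases b <;> simp only [pvStep, pvInBand] <;> (try split_ifs) <;>
    (apply Bool.eq_iff_iff.mpr; simp; all_goals omega)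

-- B's whole first pass, seen through the band test
theorem pvInBand_foldl (f : Int) (rs : List (List Int)) (p : Option Int × Option Int) :
    pvInBand (rs.foldl pvStep p) f
      = (pvInBand p f && decide (∀ r ∈ rs, PySem.List.pyGetD r 0 0 ≤ f ∧ f ≤ PySem.List.pyGetD r 1 0)) := by
  induction rs generalizing p with
  | nil => simp
  | cons r rest ih =>
    rw [List.foldl_cons, ih, pvInBand_pvStep]
    simp only [List.forall_mem_cons, Bool.decide_and, Bool.and_assoc]

-- the per-frequency tests of the two ports agree
theorem pvInBand_pvLoHi (f : Int) (rs : List (List Int)) :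
    pvInBand (pvLoHi rs) f = pvInnerOk f rs := by
  rw [pvLoHi, pvInBand_foldl]
  simp only [pvInBand, Bool.true_and]
  by_cases h : ∀ r ∈ rs, PySem.List.pyGetD r 0 0 ≤ f ∧ f ≤ PySem.List.pyGetD r 1 0
  · rw [(pvInnerOk_iff f rs).2 h]
    exact decide_eq_true h
  · simp only [h, decide_false]
    exact (Bool.eq_false_iff.mpr (fun hc => h ((pvInnerOk_iff f rs).1 hc))).symm

-- ===== VERDICT (by name: the statement is the Claim_ definition above) =====
theorem countSignals_spec : Claim_equal_countSignals := by
  intro frequencies filterRanges _ _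
  unfold Spec_countSignals countSignals countSignals_alt
  by_cases hfe : frequencies = []
  · simp [hfe]
  · rw [if_neg hfe]
    apply PySem.List.foldl_congr_mem
    intro count f _
    rw [pvInBand_pvLoHi]
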